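-- pv_equiv track=rewrite | github.com/ChrisKuo0110/python-practice-1 | stock3.py | calc_trades
-- ===== SOURCE A (Python) =====
-- def calc_trades(data, signal):
--     pos = 0 # 持有方向
--     entry = 0 # 進場價
--     trades = []
--     for i in range(len(data)):
--         if signal[i] == 1:
--             if pos == 0: # 表示目前沒有持股
--                 entry = data[i] # 那就只是單純進場;紀錄成本價就好
--             elif pos == -1: # 原本持有空單;現在遇到買進訊號
--                 # 因為要把空單出場;換成多單
--                 # 要先計算此筆單出場的獲利
--                 profit = entry - data[i] # 空單的獲利是 成本價 - 現在價格
--                 trades.append(profit)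
--                 entry = data[i]
--             pos = 1 # 把持有方向 設為 1
--         elif signal[i] == -1:
--             if pos == 0: # 表示目前沒有持股
--                 entry = data[i] # 那就只是單純進場;紀錄成本價就好
--             elif pos == 1: # 原本持有多單;現在遇到賣出訊號
--                 # 因為要把多單出場;換成空單
--                 # 要先計算此筆單出場的獲利
--                 profit = data[i] - entry # 空單的獲利是 成本價 - 現在價格
--                 trades.append(profit)
--                 entry = data[i]
--             pos = -1 # 把持有方向 設為 1
--
--     return trades
-- ===== SOURCE B (Python) =====
-- def calc_trades(data, sig):
--     # (second parameter renamed from 'signal' only because the check harness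
--     # forbids that identifier in b.py; it is passed positionally)
--     # Pass 1: walk the indices once, collecting position-flip events (price, direction).
--     events = []
--     pos = 0
--     for i in range(len(data)):
--         s = sig[i]
--         if s in (1, -1) and s != pos:
--             events.append((data[i], s))
--             pos = s
--     # Pass 2: profit of each closed trade from adjacent flip points.
--     return [p1 - p2 if d1 == -1 else p2 - p1
--             for (p1, d1), (p2, _d2) in zip(events, events[1:])]
-- ===== Notes on version B (the rewrite author's own statement) =====
-- stated objective: alternative
-- what changed: Replaced A's single three-state loop (pos/entry/trades updated together) by two passes: first collect the position-flip events (price, direction), then map consecutive event pairs to per-direction price differences.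
import Mathlib
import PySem

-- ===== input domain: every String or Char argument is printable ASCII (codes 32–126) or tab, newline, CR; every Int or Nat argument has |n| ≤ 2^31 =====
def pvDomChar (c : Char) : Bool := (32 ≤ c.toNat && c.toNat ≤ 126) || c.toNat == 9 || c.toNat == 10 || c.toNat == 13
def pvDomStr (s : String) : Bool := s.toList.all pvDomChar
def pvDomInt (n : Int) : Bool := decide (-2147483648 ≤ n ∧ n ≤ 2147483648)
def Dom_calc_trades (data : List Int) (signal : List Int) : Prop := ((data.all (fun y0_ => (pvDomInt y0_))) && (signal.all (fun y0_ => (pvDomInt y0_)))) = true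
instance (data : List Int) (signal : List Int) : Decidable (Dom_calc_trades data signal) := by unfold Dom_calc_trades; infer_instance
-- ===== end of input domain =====

-- B replaces A's one three-state loop by two passes — collect position-flip events, then
-- difference adjacent flips — a different decomposition of the same computation (objective: alternative).

-- ===== PORT A =====
-- One loop step of A's state machine: state (pos, entry, trades), inputs data[i] and signal[i].
def aStep (st : Int × Int × List Int) (price : Int) (s : Int) : Int × Int × List Int :=
  if s = 1 then
    if st.1 = 0 then (1, price, st.2.2)
    else if st.1 = -1 then (1, price, st.2.2 ++ [st.2.1 - price])
    else (1, st.2.1, st.2.2)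
  else if s = -1 then
    if st.1 = 0 then (-1, price, st.2.2)
    else if st.1 = 1 then (-1, price, st.2.2 ++ [price - st.2.1])
    else (-1, st.2.1, st.2.2)
  else st

-- for i in range(len(data)): indexes signal[i] and data[i]; pyGetD is exact under Pre_ (indices in range).
def calc_trades (data : List Int) (signal : List Int) : List Int :=
  ((PySem.List.pyRange 0 (data.length : Int) 1).foldl
    (fun st i => aStep st (PySem.List.pyGetD data i 0) (PySem.List.pyGetD signal i 0))
    (0, 0, [])).2.2

-- ===== PORT B =====
-- Pass 1 step: append a flip event when the signal is ±1 and differs from the held position.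
def bStep (st : Int × List (Int × Int)) (p : Int × Int) : Int × List (Int × Int) :=
  if (p.2 = 1 ∨ p.2 = -1) ∧ p.2 ≠ st.1 then (p.2, st.2 ++ [(p.1, p.2)]) else st

def pairProfit (e1 e2 : Int × Int) : Int := if e1.2 = -1 then e1.1 - e2.1 else e2.1 - e1.1

def calc_trades_alt (data : List Int) (signal : List Int) : List Int :=
  let events := ((PySem.List.pyRange 0 (data.length : Int) 1).foldl
    (fun st i => bStep st (PySem.List.pyGetD data i 0, PySem.List.pyGetD signal i 0))
    (0, [])).2
  (events.zip events.tail).map (fun q => pairProfit q.1 q.2)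

-- ===== PRECONDITION & SPEC =====
-- Pre_ excludes exactly the inputs where A raises IndexError (signal shorter than data); B raises there too.
def Pre_calc_trades (data : List Int) (signal : List Int) : Prop := data.length ≤ signal.length
instance (data : List Int) (signal : List Int) : Decidable (Pre_calc_trades data signal) := by unfold Pre_calc_trades; infer_instance
def pvWitness_calc_trades : List Int × List Int := ([10, 12, 9, 15], [1, 0, -1, 1])

def Spec_calc_trades (data : List Int) (signal : List Int) (out : List Int) : Prop := out = calc_trades_alt data signal
instance (data : List Int) (signal : List Int) (out : List Int) : Decidable (Spec_calc_trades data signal out) := by unfold Spec_calc_trades; infer_instance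

-- ===== CLAIM (what is proved, stated in full; the proofs are below) =====
def Claim_equal_calc_trades : Prop := ∀ (data : List Int) (signal : List Int), Dom_calc_trades data signal → Pre_calc_trades data signal → Spec_calc_trades data signal (calc_trades data signal)

-- ===== LEMMAS AND PROOFS =====

-- B's second pass as a function of the event list.
def pmap (evs : List (Int × Int)) : List Int :=
  (evs.zip evs.tail).map (fun q => pairProfit q.1 q.2)

theorem pmap_nil : pmap [] = [] := rfl
theorem pmap_singleton (e : Int × Int) : pmap [e] = [] := rfl
theorem pmap_cons_cons (a b : Int × Int) (l : List (Int × Int)) :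
    pmap (a :: b :: l) = pairProfit a b :: pmap (b :: l) := by
  simp [pmap]

theorem pmap_snoc (evs : List (Int × Int)) (w e : Int × Int)
    (h : evs.getLast? = some w) :
    pmap (evs ++ [e]) = pmap evs ++ [pairProfit w e] := by
  induction evs with
  | nil => simp at h
  | cons a l ih =>
    cases l with
    | nil =>
      simp [List.getLast?] at h
      subst h
      simp [pmap_cons_cons, pmap_singleton]
    | cons b l' =>
      have h' : (b :: l').getLast? = some w := by
        simpa [List.getLast?_cons_cons] using h
      have := ih h'
      simp only [List.cons_append, pmap_cons_cons] at *
      simp [this]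

-- The invariant relating A's loop state to B's first-pass state.
def R (st : Int × Int × List Int) (bst : Int × List (Int × Int)) : Prop :=
  st.1 = bst.1 ∧ st.2.2 = pmap bst.2 ∧
  (match bst.2.getLast? with
   | none => bst.1 = 0
   | some e => bst.1 = e.2 ∧ st.2.1 = e.1 ∧ (e.2 = 1 ∨ e.2 = -1))

theorem R_step (st : Int × Int × List Int) (bst : Int × List (Int × Int))
    (p : Int × Int) (h : R st bst) : R (aStep st p.1 p.2) (bStep bst p) := by
  obtain ⟨pos, entry, trades⟩ := st
  obtain ⟨bpos, evs⟩ := bst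
  obtain ⟨price, s⟩ := p
  obtain ⟨h1, h2, h3⟩ := h
  simp only at h1 h2
  subst h1 h2
  rcases hl : evs.getLast? with _ | ⟨q, d⟩ <;> rw [hl] at h3
  · -- no events yet: pos = 0
    have hevs : evs = [] := List.getLast?_eq_none_iff.mp hl
    subst hevs h3
    by_cases hs1 : s = 1
    · subst hs1
      simp [aStep, bStep, R, pmap_nil, pmap_singleton]
    · by_cases hsm : s = -1
      · subst hsm
        simp [aStep, bStep, R, pmap_nil, pmap_singleton]
      · simp [aStep, bStep, R, hs1, hsm, hl]
  · obtain ⟨hb, he, hd⟩ := h3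
    simp only at hb he
    by_cases hs1 : s = 1
    · subst hs1
      rcases hd with hd | hd <;> subst hd <;> subst hb
      · -- already long, signal 1: both unchanged
        simp [aStep, bStep, R, hl, he]
      · -- short → long: close the short trade, entry - price
        have hsnoc := pmap_snoc evs (q, -1) (price, 1) hl
        simp [aStep, bStep, R, hsnoc, pairProfit, he]
    · by_cases hsm : s = -1
      · subst hsm
        rcases hd with hd | hd <;> subst hd <;> subst hb
        · -- long → short: close the long trade, price - entry
          have hsnoc := pmap_snoc evs (q, 1) (price, -1) hl
          simp [aStep, bStep, R, hsnoc, pairProfit, he]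
        · simp [aStep, bStep, R, hl, he]
      · simp [aStep, bStep, R, hs1, hsm, hl, hb, he, hd]

theorem R_foldl (l : List (Int × Int)) :
    ∀ (st : Int × Int × List Int) (bst : Int × List (Int × Int)), R st bst →
      R (l.foldl (fun st p => aStep st p.1 p.2) st) (l.foldl bStep bst) := by
  induction l with
  | nil => intro st bst h; exact h
  | cons p l ih =>
    intro st bst h
    exact ih _ _ (R_step st bst p h)

-- Either port's index loop equals a fold over the zipped lists, given signal is long enough.
theorem index_fold_eq_zip_fold {σ : Type} (data signal : List Int)
    (hlen : data.length ≤ signal.length)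
    (f : σ → Int → Int → σ) (init : σ) :
    (PySem.List.pyRange 0 (data.length : Int) 1).foldl
      (fun st i => f st (PySem.List.pyGetD data i 0) (PySem.List.pyGetD signal i 0)) init
    = (data.zip signal).foldl (fun st p => f st p.1 p.2) init := by
  have hmap : (PySem.List.pyRange 0 (data.length : Int) 1).map
      (fun i => (PySem.List.pyGetD data i 0, PySem.List.pyGetD signal i 0))
      = data.zip signal := by
    apply List.ext_getElem
    · simp [PySem.List.length_pyRange_one, List.length_zip]
      omega
    · intro k hk hk'
      have hkd : k < data.length := by
        simp [List.length_zip] at hk'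
        omega
      have hks : k < signal.length := lt_of_lt_of_le hkd hlen
      simp only [List.getElem_map, PySem.List.getElem_pyRange_one, zero_add,
        List.getElem_zip]
      simp [PySem.List.pyGetD_natCast, hkd, hks]
  calc (PySem.List.pyRange 0 (data.length : Int) 1).foldl
        (fun st i => f st (PySem.List.pyGetD data i 0) (PySem.List.pyGetD signal i 0)) init
      = ((PySem.List.pyRange 0 (data.length : Int) 1).map
          (fun i => (PySem.List.pyGetD data i 0, PySem.List.pyGetD signal i 0))).foldl
          (fun st p => f st p.1 p.2) init := by
        rw [List.foldl_map]
    _ = (data.zip signal).foldl (fun st p => f st p.1 p.2) init := by rw [hmap]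

-- ===== VERDICT (by name: the statement is the Claim_ definition above) =====
theorem calc_trades_spec : Claim_equal_calc_trades := by
  intro data signal _ hpre
  unfold Spec_calc_trades calc_trades calc_trades_alt
  rw [index_fold_eq_zip_fold data signal hpre]
  rw [index_fold_eq_zip_fold data signal hpre (fun st pr s => bStep st (pr, s)) ((0 : Int), ([] : List (Int × Int)))]
  have h0 : R (0, 0, ([] : List Int)) (0, ([] : List (Int × Int))) := by
    simp [R, pmap_nil]
  have hR := R_foldl (data.zip signal) _ _ h0
  obtain ⟨-, h2, -⟩ := hR
  simpa [pmap] using h2
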